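-- pv_equiv track=rewrite | github.com/Carl-Chinatomby/Algorithms-and-Data-Structures | programing_problems/backspace_string_compare.py | _reversed_striped_char
-- ===== SOURCE A (Python) =====
-- def _reversed_striped_char(input):
--     skip = 0
--     for c in reversed(input): # reversed returns iterator O(n)
--         if c == '#':
--             skip += 1
--         elif skip:
--             skip -= 1
--         else:
--             yield c
-- ===== SOURCE B (Python) =====
-- def _reversed_striped_char(input):
--     stack = []
--     for c in input:
--         if c == '#':
--             stack = stack[:-1]
--         else:
--             stack.append(c)
--     yield from reversed(stack)
-- ===== Notes on version B (the rewrite author's own statement) =====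
-- stated objective: idiomatic
-- what changed: Replaces A's reverse-pass with a pending-skip counter by the classic forward stack traversal (append / drop-last), yielding the stack reversed at the end; note both are generators and B is non-lazy, which is unobservable when the yielded sequence is collected, and the equivalence covers string inputs (on a non-reversible iterator A would raise TypeError while B consumes it).
import Mathlib
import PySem

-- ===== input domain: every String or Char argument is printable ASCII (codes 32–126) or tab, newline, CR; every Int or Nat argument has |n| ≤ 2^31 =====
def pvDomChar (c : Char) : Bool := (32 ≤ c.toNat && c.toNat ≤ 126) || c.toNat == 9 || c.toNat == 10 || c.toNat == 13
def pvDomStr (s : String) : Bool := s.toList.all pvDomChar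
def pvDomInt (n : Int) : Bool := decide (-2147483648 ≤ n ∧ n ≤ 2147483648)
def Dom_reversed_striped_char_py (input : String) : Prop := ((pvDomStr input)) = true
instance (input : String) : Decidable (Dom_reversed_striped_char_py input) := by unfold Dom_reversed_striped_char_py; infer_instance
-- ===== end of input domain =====

-- B replaces A's reverse pass with a skip counter by a forward stack traversal (reversed at the end); idiomatic, same cost.


-- ===== PORT A =====
-- the generator's yielded sequence, collected: loop over reversed(input) with the skip counter
def goA_reversed_striped_char : List Char → Int → List String
  | [], _ => []
  | c :: rest, skip =>
    if c = '#' then goA_reversed_striped_char rest (skip + 1)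
    else if skip ≠ 0 then goA_reversed_striped_char rest (skip - 1)
    else String.mk [c] :: goA_reversed_striped_char rest skip

def reversed_striped_char_py (input : String) : List String :=
  goA_reversed_striped_char input.toList.reverse 0

-- ===== PORT B =====
-- forward stack: '#' drops the last element (stack[:-1]), otherwise append; yield reversed(stack)
def stepB_reversed_striped_char (stack : List Char) (c : Char) : List Char :=
  if c = '#' then stack.dropLast else stack ++ [c]

def reversed_striped_char_py_alt (input : String) : List String :=
  ((input.toList.foldl stepB_reversed_striped_char []).reverse).map (fun c => String.mk [c])

-- ===== PRECONDITION & SPEC =====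
def Spec_reversed_striped_char_py (input : String) (out : List String) : Prop := out = reversed_striped_char_py_alt input
instance (input : String) (out : List String) : Decidable (Spec_reversed_striped_char_py input out) := by unfold Spec_reversed_striped_char_py; infer_instance

-- ===== CLAIM (what is proved, stated in full; the proofs are below) =====
def Claim_equal_reversed_striped_char_py : Prop := ∀ (input : String), Dom_reversed_striped_char_py input → Spec_reversed_striped_char_py input (reversed_striped_char_py input)

-- ===== LEMMAS AND PROOFS =====

-- invariant: running A's reverse pass on (l ++ suffix already consumed) with n pending skips
-- equals B's forward stack for l, minus its last n elements, reversed.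
theorem goA_eq_stack (l : List Char) : ∀ (n : Nat),
    goA_reversed_striped_char l.reverse (n : Int) =
      (((l.foldl stepB_reversed_striped_char []).take
          ((l.foldl stepB_reversed_striped_char []).length - n)).reverse).map
        (fun c => String.mk [c]) := by
  induction l using List.reverseRecOn with
  | nil => intro n; simp [goA_reversed_striped_char]
  | append_singleton l c ih =>
    intro n
    have hrev : (l ++ [c]).reverse = c :: l.reverse := by simp
    rw [hrev]
    set F := l.foldl stepB_reversed_striped_char [] with hF
    by_cases hc : c = '#'
    · -- skip increments; stack drops its last element
      have hfold : (l ++ [c]).foldl stepB_reversed_striped_char [] = F.dropLast := by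
        simp [List.foldl_append, stepB_reversed_striped_char, hc, ← hF]
      have h1 : goA_reversed_striped_char (c :: l.reverse) (n : Int) =
          goA_reversed_striped_char l.reverse ((n : Int) + 1) := by
        simp [goA_reversed_striped_char, hc]
      have h2 : ((n : Int) + 1) = ((n + 1 : Nat) : Int) := by push_cast; ring
      rw [h1, h2, ih (n + 1), hfold]
      have hdl : F.dropLast = F.take (F.length - 1) := by
        simp [List.dropLast_eq_take]
      rw [hdl, List.take_take, List.length_take]
      congr 3
      omega
    · have hfold : (l ++ [c]).foldl stepB_reversed_striped_char [] = F ++ [c] := by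
        simp [List.foldl_append, stepB_reversed_striped_char, hc, ← hF]
      cases n with
      | zero =>
        have h1 : goA_reversed_striped_char (c :: l.reverse) ((0 : Nat) : Int) =
            String.mk [c] :: goA_reversed_striped_char l.reverse 0 := by
          simp [goA_reversed_striped_char, hc]
        rw [h1]
        have h0 : ((0 : Nat) : Int) = (0 : Int) := by norm_num
        rw [← h0, ih 0, hfold]
        rw [List.take_of_length_le (by simp), List.take_of_length_le (by simp)]
        simp
      | succ k =>
        have hne : ((k : Int) + 1) ≠ 0 := by omega
        have h1 : goA_reversed_striped_char (c :: l.reverse) ((k + 1 : Nat) : Int) =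
            goA_reversed_striped_char l.reverse (((k + 1 : Nat) : Int) - 1) := by
          simp [goA_reversed_striped_char, hc, hne]
        have h2 : (((k + 1 : Nat) : Int) - 1) = ((k : Nat) : Int) := by push_cast; ring
        rw [h1, h2, ih k, hfold]
        rw [List.take_append_of_le_length (by simp)]
        congr 3
        simp

-- ===== VERDICT (by name: the statement is the Claim_ definition above) =====
theorem reversed_striped_char_py_spec : Claim_equal_reversed_striped_char_py := by
  intro input _
  unfold Spec_reversed_striped_char_py reversed_striped_char_py reversed_striped_char_py_alt
  have h := goA_eq_stack input.toList 0
  simpa using h
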